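-- pv_equiv track=rewrite | github.com/Frank-Yong/DocDown | docdown/stages/extract.py | _body_excerpt
-- ===== SOURCE A (Python) =====
-- _MAX_ERROR_BODY_EXCERPT = 300
--
-- def _body_excerpt(text: str, max_chars: int = _MAX_ERROR_BODY_EXCERPT) -> str:
--     # Stream-normalize whitespace to avoid allocating all tokens for large bodies.
--     normalized_chars: list[str] = []
--     seen_non_whitespace = False
--     pending_space = False
--     exceeded_limit = False
--
--     for char in text:
--         if char.isspace():
--             if seen_non_whitespace:
--                 pending_space = True
--             continue
--
--         if pending_space:
--             normalized_chars.append(" ")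
--             pending_space = False
--
--         normalized_chars.append(char)
--         seen_non_whitespace = True
--
--         if len(normalized_chars) > max_chars:
--             exceeded_limit = True
--             break
--
--     if not exceeded_limit:
--         return "".join(normalized_chars)
--
--     return "".join(normalized_chars[:max_chars]) + "..."
-- ===== SOURCE B (Python) =====
-- _MAX_ERROR_BODY_EXCERPT = 300
--
-- def _body_excerpt(text: str, max_chars: int = _MAX_ERROR_BODY_EXCERPT) -> str:
--     # One-pass idiomatic normalization: split() tokenizes on whitespace, join rebuilds.
--     normalized = " ".join(text.split())
--     limit = max(max_chars, 0)  # a negative limit truncates everything, like a limit of 0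
--     if len(normalized) > limit:
--         return normalized[:limit] + "..."
--     return normalized
-- ===== Notes on version B (the rewrite author's own statement) =====
-- stated objective: faster
-- what changed: Replaces A's char-by-char whitespace state machine (pending-space flags, mid-scan break) by the idiomatic ' '.join(text.split()) followed by one clamped slice for truncation.
import Mathlib
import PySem

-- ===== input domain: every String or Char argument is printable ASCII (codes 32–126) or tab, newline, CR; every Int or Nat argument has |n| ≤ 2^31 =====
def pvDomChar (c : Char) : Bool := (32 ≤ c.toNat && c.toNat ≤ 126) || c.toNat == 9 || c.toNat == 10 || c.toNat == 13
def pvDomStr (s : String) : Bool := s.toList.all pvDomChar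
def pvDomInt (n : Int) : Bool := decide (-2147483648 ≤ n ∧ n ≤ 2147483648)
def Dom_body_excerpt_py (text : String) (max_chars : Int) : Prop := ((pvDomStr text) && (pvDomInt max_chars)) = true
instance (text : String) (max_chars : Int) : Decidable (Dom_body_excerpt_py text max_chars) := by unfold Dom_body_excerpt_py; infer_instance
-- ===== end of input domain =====

-- B replaces A's char-by-char whitespace state machine by ' '.join(text.split())
-- plus one clamped truncating slice; measurably faster by constant factor (C-level split/join).


-- ===== PORT A =====
-- the for-loop with its break: state (acc, seen_non_whitespace, pending_space); returns (normalized_chars, exceeded_limit)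
def loopA : List Char → Int → List Char → Bool → Bool → (List Char × Bool)
  | [], _, acc, _, _ => (acc, false)
  | c :: rest, m, acc, seen, pending =>
    if PySem.Chars.isspace c then
      loopA rest m acc seen (if seen then true else pending)
    else
      let acc1 := if pending then acc ++ [' '] else acc
      let acc2 := acc1 ++ [c]
      if (acc2.length : Int) > m then (acc2, true)
      else loopA rest m acc2 true false

def body_excerpt_py (text : String) (max_chars : Int) : String :=
  let r := loopA text.toList max_chars [] false false
  if r.2 = false then String.ofList r.1
  else String.ofList (PySem.List.slice r.1 none (some max_chars) ++ ['.', '.', '.'])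

-- ===== PORT B =====
def body_excerpt_py_alt (text : String) (max_chars : Int) : String :=
  let normalized := PySem.Chars.join [' '] (PySem.Chars.split₀ text.toList)
  let limit := max max_chars 0
  if (normalized.length : Int) > limit then
    String.ofList (PySem.List.slice normalized none (some limit) ++ ['.', '.', '.'])
  else String.ofList normalized

-- ===== PRECONDITION & SPEC =====
def Spec_body_excerpt_py (text : String) (max_chars : Int) (out : String) : Prop := out = body_excerpt_py_alt text max_chars
instance (text : String) (max_chars : Int) (out : String) : Decidable (Spec_body_excerpt_py text max_chars out) := by unfold Spec_body_excerpt_py; infer_instance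

-- ===== CLAIM (what is proved, stated in full; the proofs are below) =====
def Claim_equal_body_excerpt_py : Prop := ∀ (text : String) (max_chars : Int), Dom_body_excerpt_py text max_chars → Spec_body_excerpt_py text max_chars (body_excerpt_py text max_chars)

-- ===== LEMMAS AND PROOFS =====

-- non-space predicate
def nsp (c : Char) : Bool := !PySem.Chars.isspace c

-- the list of whitespace-separated words of l (the specification both ports meet)
def wds : List Char → List (List Char)
  | [] => []
  | c :: r =>
    if PySem.Chars.isspace c then wds r
    else (c :: r.takeWhile nsp) :: wds (r.dropWhile nsp)
termination_by l => l.length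
decreasing_by
  · simp
  · have := List.length_dropWhile_le nsp r; simp; omega

-- A's loop with the length limit removed: pure whitespace normalization
def mach : List Char → Bool → Bool → List Char
  | [], _, _ => []
  | c :: r, s, p =>
    if PySem.Chars.isspace c then mach r s (if s then true else p)
    else (if p then [' '] else []) ++ c :: mach r true false

theorem wds_head_ne_nil : ∀ l w rest, wds l = w :: rest → w ≠ [] := by
  intro l
  induction l with
  | nil => intro w rest h; simp [wds] at h
  | cons c r ih =>
    intro w rest h
    rw [wds] at h
    by_cases hc : PySem.Chars.isspace c
    · simp [hc] at h; exact ih _ _ h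
    · simp [hc] at h; simp [← h.1]

theorem go_spec : ∀ l cur acc, PySem.Chars.split₀.go l cur acc =
    acc.reverse ++ (if cur.isEmpty then wds l
      else (cur.reverse ++ l.takeWhile nsp) :: wds (l.dropWhile nsp)) := by
  intro l
  induction l with
  | nil =>
    intro cur acc
    cases cur <;> simp [PySem.Chars.split₀.go, wds]
  | cons c r ih =>
    intro cur acc
    rw [PySem.Chars.split₀.go]
    by_cases hc : PySem.Chars.isspace c
    · cases cur with
      | nil => simp [hc, ih, wds]
      | cons d cur' => simp [hc, ih, wds, List.takeWhile, List.dropWhile, nsp]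
    · cases cur with
      | nil => simp [hc, ih, wds, List.takeWhile, List.dropWhile, nsp]
      | cons d cur' => simp [hc, ih, wds, List.takeWhile, List.dropWhile, nsp]

theorem split₀_eq_wds (l : List Char) : PySem.Chars.split₀ l = wds l := by
  simp [PySem.Chars.split₀, go_spec]

-- join step used below
theorem join_cons (w : List Char) (rest : List (List Char)) :
    PySem.Chars.join [' '] (w :: rest) =
      w ++ (if rest.isEmpty then [] else ' ' :: PySem.Chars.join [' '] rest) := by
  cases rest with
  | nil => simp [PySem.Chars.join_singleton]
  | cons b bs => simp [PySem.Chars.join_cons_cons]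

def fis (l : List Char) : Bool := match l with | [] => false | c :: _ => PySem.Chars.isspace c

theorem mach_spec : ∀ l s p, mach l s p =
    (if (wds l).isEmpty then []
     else (if p || (s && fis l) then [' '] else []) ++ PySem.Chars.join [' '] (wds l)) := by
  intro l
  induction l with
  | nil => intro s p; simp [mach, wds]
  | cons c r ih =>
    intro s p
    rw [mach]
    by_cases hc : PySem.Chars.isspace c
    · rw [if_pos hc]
      rw [ih]
      rw [wds, if_pos hc]
      cases s <;> cases p <;> simp [fis, hc]
    · rw [if_neg hc]
      rw [ih]
      rw [wds, if_neg hc]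
      rw [join_cons]
      have hT : (if (wds r).isEmpty then []
          else (if (false || (true && fis r)) then [' '] else []) ++ PySem.Chars.join [' '] (wds r)) =
          r.takeWhile nsp ++ (if (wds (r.dropWhile nsp)).isEmpty then []
            else ' ' :: PySem.Chars.join [' '] (wds (r.dropWhile nsp))) := by
        cases r with
        | nil => simp [wds]
        | cons d r' =>
          by_cases hd : PySem.Chars.isspace d
          · rw [wds, if_pos hd]
            simp [fis, hd, List.takeWhile, List.dropWhile, nsp, wds, hd]
          · rw [wds, if_neg hd]
            rw [join_cons]
            simp [fis, hd, List.takeWhile, List.dropWhile, nsp]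
      rw [hT]
      simp [fis, hc]

theorem mach_init (l : List Char) :
    mach l false false = PySem.Chars.join [' '] (wds l) := by
  rw [mach_spec]
  cases h : wds l with
  | nil => simp [PySem.Chars.join_nil]
  | cons w rest => simp

theorem loopA_pos : ∀ (l : List Char) (acc : List Char) (s p : Bool) (m : Int),
    0 ≤ m → (acc.length : Int) ≤ m →
    (if ((acc ++ mach l s p).length : Int) ≤ m
     then loopA l m acc s p = (acc ++ mach l s p, false)
     else ∃ t : ℕ, m < (t : Int) ∧ t ≤ (acc ++ mach l s p).length ∧
            loopA l m acc s p = ((acc ++ mach l s p).take t, true)) := by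
  intro l
  induction l with
  | nil =>
    intro acc s p m hm hacc
    simp [loopA, mach, hacc]
  | cons c r ih =>
    intro acc s p m hm hacc
    rw [loopA]
    by_cases hc : PySem.Chars.isspace c
    · rw [if_pos hc]
      have := ih acc s (if s then true else p) m hm hacc
      rw [mach, if_pos hc]
      exact this
    · rw [if_neg hc]
      rw [mach, if_neg hc]
      set acc2 := (if p then acc ++ [' '] else acc) ++ [c] with hacc2
      have hN : acc ++ ((if p then [' '] else []) ++ c :: mach r true false)
              = acc2 ++ mach r true false := by
        cases p <;> simp [hacc2]
      rw [hN]
      by_cases hlim : (acc2.length : Int) > m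
      · rw [if_pos hlim]
        have hlen : ¬ ((acc2 ++ mach r true false).length : Int) ≤ m := by
          simp; omega
        rw [if_neg hlen]
        exact ⟨acc2.length, by exact_mod_cast hlim, by simp, by simp [List.take_left, ← hacc2]⟩
      · rw [if_neg hlim]
        exact ih acc2 true false m hm (by omega)

theorem loopA_neg : ∀ (l : List Char) (m : Int), m < 0 →
    (if (wds l).isEmpty then loopA l m [] false false = ([], false)
     else ∃ c, loopA l m [] false false = ([c], true)) := by
  intro l
  induction l with
  | nil => intro m hm; simp [loopA, wds]
  | cons c r ih =>
    intro m hm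
    rw [loopA]
    by_cases hc : PySem.Chars.isspace c
    · rw [if_pos hc]
      rw [wds, if_pos hc]
      exact ih m hm
    · rw [if_neg hc]
      rw [wds, if_neg hc]
      simp only [List.isEmpty_cons, Bool.false_eq_true, if_false]
      refine ⟨c, ?_⟩
      simp
      intro h2
      exact absurd h2 (by omega)

theorem join_wds_ne_nil {l : List Char} (h : ¬ (wds l).isEmpty) :
    PySem.Chars.join [' '] (wds l) ≠ [] := by
  cases hw : wds l with
  | nil => simp [hw] at h
  | cons w rest =>
    rw [join_cons]
    have := wds_head_ne_nil l w rest hw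
    cases w with
    | nil => exact absurd rfl this
    | cons a w' => simp

-- ===== VERDICT (by name: the statement is the Claim_ definition above) =====
theorem body_excerpt_py_spec : Claim_equal_body_excerpt_py := by
  intro text m _
  unfold Spec_body_excerpt_py body_excerpt_py body_excerpt_py_alt
  set l := text.toList with hl
  rw [split₀_eq_wds]
  by_cases hm : 0 ≤ m
  · have hmax : max m 0 = m := by omega
    rw [hmax]
    have h := loopA_pos l [] false false m hm (by simpa using hm)
    rw [mach_init] at h
    simp only [List.nil_append] at h
    set N := PySem.Chars.join [' '] (wds l) with hN
    by_cases hlen : (N.length : Int) ≤ m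
    · rw [if_pos hlen] at h
      rw [h]
      simp [hlen]
    · rw [if_neg hlen] at h
      obtain ⟨t, hmt, htN, hloop⟩ := h
      rw [hloop]
      have h1 : ¬ ((true : Bool) = false) := by simp
      rw [if_neg h1]
      rw [if_pos (by omega : (N.length : Int) > m)]
      congr 1
      rw [PySem.List.slice_to _ hm, PySem.List.slice_to _ hm]
      rw [List.take_take]
      congr 2
      omega
  · have hm' : m < 0 := by omega
    have hmax : max m 0 = 0 := by omega
    rw [hmax]
    have h := loopA_neg l m hm'
    by_cases hw : (wds l).isEmpty
    · rw [if_pos hw] at h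
      rw [h]
      have : PySem.Chars.join [' '] (wds l) = [] := by
        cases hwl : wds l with
        | nil => simp [PySem.Chars.join_nil]
        | cons w r => rw [hwl] at hw; simp at hw
      simp [this]
    · rw [if_neg hw] at h
      obtain ⟨c, hloop⟩ := h
      rw [hloop]
      have hne := join_wds_ne_nil hw
      have hpos : (((PySem.Chars.join [' '] (wds l)).length : Int) > 0) := by
        have : (PySem.Chars.join [' '] (wds l)).length ≠ 0 := by
          simpa [List.length_eq_zero_iff] using hne
        omega
      rw [if_pos hpos]
      have h1 : ¬ ((true : Bool) = false) := by simp
      rw [if_neg h1]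
      congr 1
      have hk : ∃ k : ℕ, 0 < k ∧ m = -(k : Int) := ⟨(-m).toNat, by omega, by omega⟩
      obtain ⟨k, hk0, hkm⟩ := hk
      rw [hkm, PySem.List.slice_to_neg_natCast _ k hk0]
      have h1k : ([c] : List Char).length - k = 0 := by simp; omega
      rw [h1k]
      rw [PySem.List.slice_to _ (by omega : (0:Int) ≤ 0)]
      simp
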